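-- pv_equiv track=rewrite | github.com/nehasriva/linolog | src/linolog/agents/tag_agent.py | _get_size_tags
-- ===== SOURCE A (Python) =====
-- from typing import Dict, Any, List
--
-- def _get_size_tags(size: str) -> List[str]:
--     """Generate tags based on print size."""
--     size_lower = size.lower()
--     tags = []
--
--     if "small" in size_lower or any(
--         dim in size_lower for dim in ["4x6", "5x7", "6x8"]
--     ):
--         tags.append("small")
--     elif "large" in size_lower or any(
--         dim in size_lower for dim in ["11x14", "12x16", "16x20"]
--     ):
--         tags.append("large")
--     elif "medium" in size_lower or any(
--         dim in size_lower for dim in ["8x10", "9x12", "10x12"]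
--     ):
--         tags.append("medium")
--
--     return tags
-- ===== SOURCE B (Python) =====
-- from typing import List
--
-- _KEYWORD_PRIORITY = [
--     ("small", 0), ("4x6", 0), ("5x7", 0), ("6x8", 0),
--     ("large", 1), ("11x14", 1), ("12x16", 1), ("16x20", 1),
--     ("medium", 2), ("8x10", 2), ("9x12", 2), ("10x12", 2),
-- ]
-- _TAGS = ["small", "large", "medium"]
--
--
-- def _get_size_tags(size: str) -> List[str]:
--     """Single anchored sweep: walk the lowercased text once; at each position
--     test which keywords start there and keep the minimum priority seen."""
--     s = size.lower()
--     best = 3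
--     for i in range(len(s)):
--         for kw, p in _KEYWORD_PRIORITY:
--             if p < best and s.startswith(kw, i):
--                 best = p
--     return [_TAGS[best]] if best < 3 else []
-- ===== Notes on version B (the rewrite author's own statement) =====
-- stated objective: alternative
-- what changed: Replaces A's three if-elif branches of per-keyword substring tests by a single anchored sweep: one pass over the lowercased text that, at each position, tests which keywords start there and keeps the minimum matched priority, finally mapping that priority to its tag.
import Mathlib
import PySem

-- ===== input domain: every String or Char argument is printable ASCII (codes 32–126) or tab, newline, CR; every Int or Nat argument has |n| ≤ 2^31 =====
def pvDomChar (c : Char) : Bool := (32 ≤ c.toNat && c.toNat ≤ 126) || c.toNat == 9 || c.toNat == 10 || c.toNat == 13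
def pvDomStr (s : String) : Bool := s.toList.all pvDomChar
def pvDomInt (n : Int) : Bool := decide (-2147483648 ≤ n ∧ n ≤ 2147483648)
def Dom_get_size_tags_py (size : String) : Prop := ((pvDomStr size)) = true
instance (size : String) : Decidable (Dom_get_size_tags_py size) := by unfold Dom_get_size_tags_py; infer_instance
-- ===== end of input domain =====

-- B replaces A's per-keyword if-elif cascade by a single anchored sweep over the text
-- keeping the minimum matched priority: a different traversal (alternative decomposition).

-- ===== PORT A =====
def get_size_tags_py (size : String) : List String :=
  let size_lower := PySem.Str.lower size
  let tags : List String := []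
  if PySem.Str.isIn "small" size_lower
      || (["4x6", "5x7", "6x8"].any fun dim => PySem.Str.isIn dim size_lower) then
    tags ++ ["small"]
  else if PySem.Str.isIn "large" size_lower
      || (["11x14", "12x16", "16x20"].any fun dim => PySem.Str.isIn dim size_lower) then
    tags ++ ["large"]
  else if PySem.Str.isIn "medium" size_lower
      || (["8x10", "9x12", "10x12"].any fun dim => PySem.Str.isIn dim size_lower) then
    tags ++ ["medium"]
  else
    tags

-- ===== PORT B =====
def pvKwPrio : List (List Char × Nat) :=
  [("small".toList, 0), ("4x6".toList, 0), ("5x7".toList, 0), ("6x8".toList, 0),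
   ("large".toList, 1), ("11x14".toList, 1), ("12x16".toList, 1), ("16x20".toList, 1),
   ("medium".toList, 2), ("9x12".toList, 2), ("8x10".toList, 2), ("10x12".toList, 2)]

def pvTags : List String := ["small", "large", "medium"]

-- Python's s.startswith(kw, i) for 0 ≤ i is exactly `startswith (s.drop i) kw`.
def get_size_tags_py_alt (size : String) : List String :=
  let s := (PySem.Str.lower size).toList
  let best := (List.range s.length).foldl
    (fun b i => pvKwPrio.foldl
      (fun b kp => if kp.2 < b && PySem.Chars.startswith (s.drop i) kp.1 then kp.2 else b) b) 3
  if best < 3 then [pvTags.getD best ""] else []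

-- ===== PRECONDITION & SPEC =====
def Spec_get_size_tags_py (size : String) (out : List String) : Prop := out = get_size_tags_py_alt size
instance (size : String) (out : List String) : Decidable (Spec_get_size_tags_py size out) := by unfold Spec_get_size_tags_py; infer_instance

-- ===== CLAIM =====
def Claim_equal_get_size_tags_py : Prop := ∀ (size : String), Dom_get_size_tags_py size → Spec_get_size_tags_py size (get_size_tags_py size)

-- ===== LEMMAS AND PROOFS =====

-- the inner keyword fold never exceeds p iff the seed is ≤ p or some matching entry has priority ≤ p
theorem pv_inner_le_iff (t : List Char) (tbl : List (List Char × Nat)) (b p : Nat) :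
    tbl.foldl (fun b kp => if kp.2 < b && PySem.Chars.startswith t kp.1 then kp.2 else b) b ≤ p
    ↔ b ≤ p ∨ ∃ kp ∈ tbl, PySem.Chars.startswith t kp.1 = true ∧ kp.2 ≤ p := by
  induction tbl generalizing b with
  | nil => simp
  | cons kp tbl ih =>
    simp only [List.foldl_cons, ih, List.mem_cons]
    by_cases hsw : PySem.Chars.startswith t kp.1 = true
    · simp only [hsw, Bool.and_true]
      constructor
      · rintro (h | h)
        · by_cases hlt : kp.2 < b
          · simp [hlt] at h
            exact Or.inr ⟨kp, Or.inl rfl, hsw, h⟩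
          · simp [hlt] at h
            exact Or.inl h
        · obtain ⟨q, hq, h1, h2⟩ := h
          exact Or.inr ⟨q, Or.inr hq, h1, h2⟩
      · rintro (h | ⟨q, (rfl | hq), h1, h2⟩)
        · left; by_cases hlt : kp.2 < b <;> simp [hlt] <;> omega
        · left; by_cases hlt : q.2 < b <;> simp [hlt] <;> omega
        · exact Or.inr ⟨q, hq, h1, h2⟩
    · simp [hsw]

-- the outer position fold: ≤ p iff seed ≤ p or some keyword matches at some listed position with priority ≤ p
theorem pv_outer_le_iff (s : List Char) (is : List Nat) (b p : Nat) :
    is.foldl (fun b i => pvKwPrio.foldl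
      (fun b kp => if kp.2 < b && PySem.Chars.startswith (s.drop i) kp.1 then kp.2 else b) b) b ≤ p
    ↔ b ≤ p ∨ ∃ i ∈ is, ∃ kp ∈ pvKwPrio, PySem.Chars.startswith (s.drop i) kp.1 = true ∧ kp.2 ≤ p := by
  induction is generalizing b with
  | nil => simp
  | cons i is ih =>
    simp only [List.foldl_cons, ih, pv_inner_le_iff, List.mem_cons]
    constructor
    · rintro ((h | ⟨q, hq, h1, h2⟩) | ⟨j, hj, hrest⟩)
      · exact Or.inl h
      · exact Or.inr ⟨i, Or.inl rfl, q, hq, h1, h2⟩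
      · exact Or.inr ⟨j, Or.inr hj, hrest⟩
    · rintro (h | ⟨j, (rfl | hj), hrest⟩)
      · exact Or.inl (Or.inl h)
      · exact Or.inl (Or.inr hrest)
      · exact Or.inr ⟨j, hj, hrest⟩

-- a nonempty keyword occurs as an infix iff it starts at some position < length
theorem pv_pos_iff (s kw : List Char) (h : kw ≠ []) :
    (∃ i ∈ List.range s.length, PySem.Chars.startswith (s.drop i) kw = true)
    ↔ PySem.Chars.isIn kw s = true := by
  rw [← PySem.Chars.exists_prefix_drop_iff_isIn]
  constructor
  · rintro ⟨i, _, hi⟩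
    exact ⟨i, (PySem.Chars.startswith_iff _ _).mp hi⟩
  · rintro ⟨j, hj⟩
    by_cases hb : j < s.length
    · exact ⟨j, List.mem_range.mpr hb, (PySem.Chars.startswith_iff _ _).mpr hj⟩
    · rw [List.drop_eq_nil_of_le (by omega)] at hj
      exact absurd (List.prefix_nil.mp hj) h

-- expansion of the table existential at each priority threshold
theorem pv_exp0 (s : List Char) :
    (3 ≤ 0 ∨ ∃ kp ∈ pvKwPrio, kp.2 ≤ 0 ∧ PySem.Chars.isIn kp.1 s = true) ↔
    (PySem.Chars.isIn "small".toList s = true ∨ PySem.Chars.isIn "4x6".toList s = true ∨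
     PySem.Chars.isIn "5x7".toList s = true ∨ PySem.Chars.isIn "6x8".toList s = true) := by
  simp [pvKwPrio]

theorem pv_exp1 (s : List Char) :
    (3 ≤ 1 ∨ ∃ kp ∈ pvKwPrio, kp.2 ≤ 1 ∧ PySem.Chars.isIn kp.1 s = true) ↔
    ((PySem.Chars.isIn "small".toList s = true ∨ PySem.Chars.isIn "4x6".toList s = true ∨
      PySem.Chars.isIn "5x7".toList s = true ∨ PySem.Chars.isIn "6x8".toList s = true) ∨
     (PySem.Chars.isIn "large".toList s = true ∨ PySem.Chars.isIn "11x14".toList s = true ∨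
      PySem.Chars.isIn "12x16".toList s = true ∨ PySem.Chars.isIn "16x20".toList s = true)) := by
  simp [pvKwPrio]; tauto

theorem pv_exp2 (s : List Char) :
    (3 ≤ 2 ∨ ∃ kp ∈ pvKwPrio, kp.2 ≤ 2 ∧ PySem.Chars.isIn kp.1 s = true) ↔
    (((PySem.Chars.isIn "small".toList s = true ∨ PySem.Chars.isIn "4x6".toList s = true ∨
       PySem.Chars.isIn "5x7".toList s = true ∨ PySem.Chars.isIn "6x8".toList s = true) ∨
      (PySem.Chars.isIn "large".toList s = true ∨ PySem.Chars.isIn "11x14".toList s = true ∨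
       PySem.Chars.isIn "12x16".toList s = true ∨ PySem.Chars.isIn "16x20".toList s = true)) ∨
     (PySem.Chars.isIn "medium".toList s = true ∨ PySem.Chars.isIn "8x10".toList s = true ∨
      PySem.Chars.isIn "9x12".toList s = true ∨ PySem.Chars.isIn "10x12".toList s = true)) := by
  simp [pvKwPrio]; tauto

-- ===== VERDICT =====
theorem get_size_tags_py_spec : Claim_equal_get_size_tags_py := by
  intro size _
  unfold Spec_get_size_tags_py get_size_tags_py get_size_tags_py_alt
  simp only [List.any_cons, List.any_nil, Bool.or_false, List.nil_append, PySem.Str.isIn_eq]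
  set s := (PySem.Str.lower size).toList with hs
  set best := (List.range s.length).foldl
    (fun b i => pvKwPrio.foldl
      (fun b kp => if kp.2 < b && PySem.Chars.startswith (s.drop i) kp.1 then kp.2 else b) b) 3 with hbest
  have hne : ∀ kp ∈ pvKwPrio, kp.1 ≠ [] := by decide
  have key : ∀ p, best ≤ p ↔ 3 ≤ p ∨ ∃ kp ∈ pvKwPrio, kp.2 ≤ p ∧ PySem.Chars.isIn kp.1 s = true := by
    intro p
    rw [hbest, pv_outer_le_iff]
    apply or_congr Iff.rfl
    constructor
    · rintro ⟨i, hi, kp, hkp, hsw, hp⟩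
      exact ⟨kp, hkp, hp, (pv_pos_iff s kp.1 (hne kp hkp)).mp ⟨i, hi, hsw⟩⟩
    · rintro ⟨kp, hkp, hp, hin⟩
      obtain ⟨i, hi, hsw⟩ := (pv_pos_iff s kp.1 (hne kp hkp)).mpr hin
      exact ⟨i, hi, kp, hkp, hsw, hp⟩
  have h3 : best ≤ 3 := (key 3).mpr (Or.inl le_rfl)
  have h0 : best ≤ 0 ↔ (PySem.Chars.isIn "small".toList s = true ∨ PySem.Chars.isIn "4x6".toList s = true ∨
      PySem.Chars.isIn "5x7".toList s = true ∨ PySem.Chars.isIn "6x8".toList s = true) := by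
    rw [key 0, pv_exp0]
  have h1 : best ≤ 1 ↔ ((PySem.Chars.isIn "small".toList s = true ∨ PySem.Chars.isIn "4x6".toList s = true ∨
      PySem.Chars.isIn "5x7".toList s = true ∨ PySem.Chars.isIn "6x8".toList s = true) ∨
      (PySem.Chars.isIn "large".toList s = true ∨ PySem.Chars.isIn "11x14".toList s = true ∨
      PySem.Chars.isIn "12x16".toList s = true ∨ PySem.Chars.isIn "16x20".toList s = true)) := by
    rw [key 1, pv_exp1]
  have h2 : best ≤ 2 ↔ (((PySem.Chars.isIn "small".toList s = true ∨ PySem.Chars.isIn "4x6".toList s = true ∨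
      PySem.Chars.isIn "5x7".toList s = true ∨ PySem.Chars.isIn "6x8".toList s = true) ∨
      (PySem.Chars.isIn "large".toList s = true ∨ PySem.Chars.isIn "11x14".toList s = true ∨
      PySem.Chars.isIn "12x16".toList s = true ∨ PySem.Chars.isIn "16x20".toList s = true)) ∨
      (PySem.Chars.isIn "medium".toList s = true ∨ PySem.Chars.isIn "8x10".toList s = true ∨
      PySem.Chars.isIn "9x12".toList s = true ∨ PySem.Chars.isIn "10x12".toList s = true)) := by
    rw [key 2, pv_exp2]
  by_cases G0 : PySem.Chars.isIn "small".toList s = true ∨ PySem.Chars.isIn "4x6".toList s = true ∨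
      PySem.Chars.isIn "5x7".toList s = true ∨ PySem.Chars.isIn "6x8".toList s = true
  · have hb : best = 0 := Nat.le_zero.mp (h0.mpr G0)
    rw [if_pos (by simpa [Bool.or_eq_true] using G0), hb]
    decide
  · rw [if_neg (by simpa [Bool.or_eq_true] using G0)]
    by_cases G1 : PySem.Chars.isIn "large".toList s = true ∨ PySem.Chars.isIn "11x14".toList s = true ∨
        PySem.Chars.isIn "12x16".toList s = true ∨ PySem.Chars.isIn "16x20".toList s = true
    · have hb : best = 1 := by
        have hle : best ≤ 1 := h1.mpr (Or.inr G1)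
        have hgt : ¬ best ≤ 0 := fun h => G0 (h0.mp h)
        omega
      rw [if_pos (by simpa [Bool.or_eq_true] using G1), hb]
      decide
    · rw [if_neg (by simpa [Bool.or_eq_true] using G1)]
      by_cases G2 : PySem.Chars.isIn "medium".toList s = true ∨ PySem.Chars.isIn "8x10".toList s = true ∨
          PySem.Chars.isIn "9x12".toList s = true ∨ PySem.Chars.isIn "10x12".toList s = true
      · have hb : best = 2 := by
          have hle : best ≤ 2 := h2.mpr (Or.inr G2)
          have hgt : ¬ best ≤ 1 := fun h => (h1.mp h).elim G0 G1
          omega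
        rw [if_pos (by simpa [Bool.or_eq_true] using G2), hb]
        decide
      · rw [if_neg (by simpa [Bool.or_eq_true] using G2)]
        have hb : best = 3 := by
          have hgt : ¬ best ≤ 2 := fun h => ((h2.mp h).elim (fun h => h.elim G0 G1)) G2
          omega
        rw [hb]
        decide
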